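-- pv_equiv track=rewrite | github.com/SegataLab/metaclock | HomoAlignsGenerator_dev_3.py | consensus_col_builder
-- ===== SOURCE A (Python) =====
-- def check_max_uniq(site_lst):
--
-- 	votes = {'A': 0, 'T': 0, 'G': 0, 'C': 0, '-': 0}
-- 	for s in site_lst:
-- 		if s in votes:
-- 			votes[s] += 1
-- 		else:
-- 			consensus = '-'
--
-- 	consensus = max(votes, key=votes.get)
--
-- 	return consensus
--
-- def consensus_col_builder(lst_homo_cols, refs_num = 2): # ? Check here, might be some problems.
-- 	lst_homo_cols = [c.split("$")[-1] for c in lst_homo_cols]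
-- 	consensus_col = []
-- 	if len(lst_homo_cols) >= refs_num:
-- 		for taxa in range(len(lst_homo_cols[0])):
-- 			site_lst = []
-- 			for col in range(len(lst_homo_cols)):
-- 				site_lst.append(lst_homo_cols[col][taxa])
-- 			# consensus_col.append(site_checker(site_lst))
-- 			consensus_col.append(check_max_uniq(site_lst))
--
-- 		return ''.join(consensus_col)
-- 	else:
-- 		pass
-- ===== SOURCE B (Python) =====
-- def _tally_row(counts, col, ncols):
-- 	for i in range(ncols):
-- 		ch = col[i]
-- 		if ch in counts[i]:
-- 			counts[i][ch] += 1
--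
-- def consensus_col_builder(lst_homo_cols, refs_num = 2):
-- 	cols = [c.split("$")[-1] for c in lst_homo_cols]
-- 	if len(cols) < refs_num:
-- 		return None
-- 	ncols = len(cols[0])
-- 	counts = [{'A': 0, 'T': 0, 'G': 0, 'C': 0, '-': 0} for _ in range(ncols)]
-- 	for col in cols:
-- 		_tally_row(counts, col, ncols)
-- 	return ''.join(max(c, key=c.get) for c in counts)
-- ===== Notes on version B (the rewrite author's own statement) =====
-- stated objective: alternative
-- what changed: Replaces A's column-major pass (build a site list per column, then one vote dict per column) by a single row-major pass over the sequences that updates a preallocated table of per-column count dicts, joining the per-dict argmax at the end.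
import Mathlib
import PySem

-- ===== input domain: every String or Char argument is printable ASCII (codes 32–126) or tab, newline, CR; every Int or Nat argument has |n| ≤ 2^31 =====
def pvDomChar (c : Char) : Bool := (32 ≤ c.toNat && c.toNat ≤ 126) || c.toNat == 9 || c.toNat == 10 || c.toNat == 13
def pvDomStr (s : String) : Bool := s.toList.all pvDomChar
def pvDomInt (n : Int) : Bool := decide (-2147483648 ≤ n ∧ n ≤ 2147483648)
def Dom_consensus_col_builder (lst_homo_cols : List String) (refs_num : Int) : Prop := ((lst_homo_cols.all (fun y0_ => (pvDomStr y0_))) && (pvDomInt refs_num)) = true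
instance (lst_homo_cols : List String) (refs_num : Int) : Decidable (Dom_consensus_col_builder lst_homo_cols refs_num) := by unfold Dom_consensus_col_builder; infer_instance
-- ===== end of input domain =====

-- B re-implements A row-major (one pass over the rows updating a table of per-column count
-- dicts) instead of A's column-major site-list-per-column pass; same complexity ("alternative").

-- shared small helpers (both Pythons use literally these expressions)
-- c.split("$")[-1]
def pvLastSeg (c : String) : String := PySem.List.pyGetD ((PySem.Str.split? c "$").getD []) (-1) ""
-- s[i] for an index the precondition keeps in range (default never read inside Pre_)
def pvCharAt (s : String) (i : Int) : Char := PySem.List.pyGetD s.toList i 'A'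
-- {'A': 0, 'T': 0, 'G': 0, 'C': 0, '-': 0}
def pvInitVotes : PySem.Dict Char Int := PySem.Dict.ofList [('A', 0), ('T', 0), ('G', 0), ('C', 0), ('-', 0)]
-- max(d, key=d.get): first key of maximal value, in insertion order
def pvArgmax (d : PySem.Dict Char Int) : Char := (PySem.List.max? d.keys (fun k => d.getD k 0)).getD '-'

-- ===== PORT A =====
def check_max_uniq (site_lst : List Char) : Char :=
  let votes := site_lst.foldl
    (fun votes s => if votes.contains s then votes.modify s 0 (· + 1) else votes) pvInitVotes
  -- the Python 'else: consensus = '-'' branch only assigns a local that is overwritten below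
  pvArgmax votes

def consensus_col_builder (lst_homo_cols : List String) (refs_num : Int) : Option String :=
  let cols := lst_homo_cols.map pvLastSeg
  if (cols.length : Int) ≥ refs_num then
    let consensus_col := (PySem.List.pyRange 0 (PySem.Str.len (PySem.List.pyGetD cols 0 "")) 1).foldl
      (fun acc taxa =>
        let site_lst := (PySem.List.pyRange 0 (cols.length : Int) 1).foldl
          (fun site col => site ++ [pvCharAt (PySem.List.pyGetD cols col "") taxa]) []
        acc ++ [check_max_uniq site_lst]) []
    some (String.ofList consensus_col)
  else
    none

-- ===== PORT B =====
def pvTallyRow (counts : List (PySem.Dict Char Int)) (col : String) (ncols : Nat) :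
    List (PySem.Dict Char Int) :=
  (List.range ncols).foldl
    (fun cs (i : Nat) =>
      let ch := pvCharAt col (i : Int)
      if (cs.getD i pvInitVotes).contains ch then
        cs.set i ((cs.getD i pvInitVotes).modify ch 0 (· + 1))
      else cs)
    counts

def consensus_col_builder_alt (lst_homo_cols : List String) (refs_num : Int) : Option String :=
  let cols := lst_homo_cols.map pvLastSeg
  if (cols.length : Int) < refs_num then none
  else
    let ncols := (PySem.List.pyGetD cols 0 "").toList.length
    let counts := cols.foldl (fun cs col => pvTallyRow cs col ncols)
      (List.replicate ncols pvInitVotes)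
    some (String.ofList (counts.map pvArgmax))

-- ===== PRECONDITION & SPEC =====
-- Pre_ excludes exactly the inputs where Python A raises IndexError: when the guard passes,
-- the list must be nonempty (A indexes lst_homo_cols[0]) and every '$'-stripped column must be
-- at least as long as the first one (A reads index taxa of every column).
def Pre_consensus_col_builder (lst_homo_cols : List String) (refs_num : Int) : Prop :=
  refs_num ≤ (lst_homo_cols.length : Int) →
    lst_homo_cols ≠ [] ∧
    ∀ s ∈ lst_homo_cols,
      (pvLastSeg (lst_homo_cols.headD "")).toList.length ≤ (pvLastSeg s).toList.length
instance (lst_homo_cols : List String) (refs_num : Int) : Decidable (Pre_consensus_col_builder lst_homo_cols refs_num) := by unfold Pre_consensus_col_builder; infer_instance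

def pvWitness_consensus_col_builder : List String × Int := (["x$ATG-", "CTGA", "ATCA"], 2)

def Spec_consensus_col_builder (lst_homo_cols : List String) (refs_num : Int) (out : Option String) : Prop := out = consensus_col_builder_alt lst_homo_cols refs_num
instance (lst_homo_cols : List String) (refs_num : Int) (out : Option String) : Decidable (Spec_consensus_col_builder lst_homo_cols refs_num out) := by unfold Spec_consensus_col_builder; infer_instance

-- ===== CLAIM (what is proved, stated in full; the proofs are below) =====
def Claim_equal_consensus_col_builder : Prop := ∀ (lst_homo_cols : List String) (refs_num : Int), Dom_consensus_col_builder lst_homo_cols refs_num → Pre_consensus_col_builder lst_homo_cols refs_num → Spec_consensus_col_builder lst_homo_cols refs_num (consensus_col_builder lst_homo_cols refs_num)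

-- ===== LEMMAS AND PROOFS =====

-- one vote-dict update step, shared shape of both loops
def pvStep (d : PySem.Dict Char Int) (ch : Char) : PySem.Dict Char Int :=
  if d.contains ch then d.modify ch 0 (· + 1) else d

-- the per-column count both programs compute
def pvPerCol (cols : List String) (j : Nat) : PySem.Dict Char Int :=
  cols.foldl (fun d col => pvStep d (pvCharAt col (j : Int))) pvInitVotes

theorem pvTallyRow_spec (col : String) (n : Nat) (cs : List (PySem.Dict Char Int))
    (hn : n ≤ cs.length) :
    (pvTallyRow cs col n).length = cs.length ∧
    ∀ j : Nat, (pvTallyRow cs col n).getD j pvInitVotes =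
      if j < n then pvStep (cs.getD j pvInitVotes) (pvCharAt col (j : Int))
      else cs.getD j pvInitVotes := by
  induction n with
  | zero => simp [pvTallyRow]
  | succ n ih =>
    obtain ⟨ihlen, ihget⟩ := ih (Nat.le_of_succ_le hn)
    have hlt : n < cs.length := hn
    have hTn : (pvTallyRow cs col n).getD n pvInitVotes = cs.getD n pvInitVotes := by
      simpa using ihget n
    have hset_eq : ∀ (l : List (PySem.Dict Char Int)) (i : Nat) (a : PySem.Dict Char Int),
        i < l.length → (l.set i a).getD i pvInitVotes = a := by
      intro l i a h
      simp [List.getD, List.getElem?_set_self h]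
    have hset_ne : ∀ (l : List (PySem.Dict Char Int)) (i j : Nat) (a : PySem.Dict Char Int),
        i ≠ j → (l.set i a).getD j pvInitVotes = l.getD j pvInitVotes := by
      intro l i j a h
      simp [List.getD, List.getElem?_set_ne h]
    have hstep : pvTallyRow cs col (n + 1) =
        (fun cs (i : Nat) =>
          let ch := pvCharAt col (i : Int)
          if (cs.getD i pvInitVotes).contains ch then
            cs.set i ((cs.getD i pvInitVotes).modify ch 0 (· + 1))
          else cs) (pvTallyRow cs col n) n := by
      unfold pvTallyRow
      rw [List.range_succ, List.foldl_append]
      rfl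
    rw [hstep]
    by_cases hc : ((pvTallyRow cs col n).getD n pvInitVotes).contains (pvCharAt col (n : Int)) = true
    · simp only [if_pos hc]
      refine ⟨by simpa using ihlen, fun j => ?_⟩
      rcases eq_or_ne j n with h | hj
      · subst h
        rw [hset_eq _ _ _ (by omega), hTn, if_pos (Nat.lt_succ_self j), pvStep,
          if_pos (by rwa [hTn] at hc)]
      · rw [hset_ne _ _ _ _ (Ne.symm hj), ihget j]
        rcases Nat.lt_or_ge j n with h | h
        · rw [if_pos h, if_pos (by omega)]
        · rw [if_neg (by omega), if_neg (by omega)]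
    · simp only [if_neg hc]
      refine ⟨ihlen, fun j => ?_⟩
      rw [ihget j]
      rcases eq_or_ne j n with h | hj
      · subst h
        rw [if_neg (lt_irrefl j), if_pos (Nat.lt_succ_self j), pvStep,
          if_neg (by rwa [hTn] at hc)]
      · rcases Nat.lt_or_ge j n with h | h
        · rw [if_pos h, if_pos (by omega)]
        · rw [if_neg (by omega), if_neg (by omega)]

theorem pvTable_spec (n : Nat) (rows : List String) (cs : List (PySem.Dict Char Int))
    (h : cs.length = n) :
    (rows.foldl (fun cs col => pvTallyRow cs col n) cs).length = n ∧
    ∀ j : Nat, j < n →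
      (rows.foldl (fun cs col => pvTallyRow cs col n) cs).getD j pvInitVotes =
        rows.foldl (fun d col => pvStep d (pvCharAt col (j : Int))) (cs.getD j pvInitVotes) := by
  induction rows generalizing cs with
  | nil => exact ⟨h, fun j _ => rfl⟩
  | cons col rows ih =>
    obtain ⟨tlen, tget⟩ := pvTallyRow_spec col n cs (le_of_eq h.symm)
    obtain ⟨ilen, iget⟩ := ih (pvTallyRow cs col n) (tlen.trans h)
    refine ⟨ilen, fun j hj => ?_⟩
    have := iget j hj
    simp only [List.foldl_cons]
    rw [this, tget j, if_pos hj]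

-- ===== VERDICT (by name: the statement is the Claim_ definition above) =====
theorem pvChars_eq (cols : List String) :
    (PySem.List.pyRange 0 (PySem.Str.len (PySem.List.pyGetD cols 0 "")) 1).foldl
      (fun acc taxa =>
        let site_lst := (PySem.List.pyRange 0 (cols.length : Int) 1).foldl
          (fun site col => site ++ [pvCharAt (PySem.List.pyGetD cols col "") taxa]) []
        acc ++ [check_max_uniq site_lst]) [] =
    (cols.foldl (fun cs col => pvTallyRow cs col (PySem.List.pyGetD cols 0 "").toList.length)
      (List.replicate (PySem.List.pyGetD cols 0 "").toList.length pvInitVotes)).map pvArgmax := by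
  set n := (PySem.List.pyGetD cols 0 "").toList.length with hn
  -- left side: turn both append-loops into maps, and the site loop into cols.map
  have hsite : ∀ t : Int,
      (PySem.List.pyRange 0 (cols.length : Int) 1).map
        (fun col => pvCharAt (PySem.List.pyGetD cols col "") t) =
      cols.map (fun c => pvCharAt c t) := by
    intro t
    conv_rhs => rw [← PySem.List.map_pyGetD_pyRange_zero' cols ""]
    rw [List.map_map]
    rfl
  have hcmu : ∀ j : Nat,
      check_max_uniq (cols.map (fun c => pvCharAt c (j : Int))) = pvArgmax (pvPerCol cols j) := by
    intro j
    unfold check_max_uniq pvPerCol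
    rw [List.foldl_map]
    simp only [pvStep]
  -- right side: characterise the count table
  obtain ⟨hlen, hget⟩ := pvTable_spec n cols (List.replicate n pvInitVotes)
    (List.length_replicate)
  have hcounts : cols.foldl (fun cs col => pvTallyRow cs col n) (List.replicate n pvInitVotes) =
      (List.range n).map (fun j => pvPerCol cols j) := by
    apply List.ext_getElem (by simp [hlen])
    intro i h1 h2
    have hi : i < n := by rwa [hlen] at h1
    have h3 : (cols.foldl (fun cs col => pvTallyRow cs col n) (List.replicate n pvInitVotes))[i] =
        (cols.foldl (fun cs col => pvTallyRow cs col n) (List.replicate n pvInitVotes)).getD i pvInitVotes := by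
      simp [List.getD, List.getElem?_eq_getElem h1]
    rw [h3, hget i hi]
    simp only [List.getElem_map, List.getElem_range]
    unfold pvPerCol
    exact congrArg (fun d => List.foldl (fun d col => pvStep d (pvCharAt col (i : Int))) d cols)
      (List.getD_replicate pvInitVotes hi)
  rw [hcounts, List.map_map]
  simp only [PySem.Str.len_eq, PySem.List.foldl_append_singleton_eq_map, List.nil_append, ← hn]
  simp only [hsite]
  rw [PySem.List.pyRange_zero_natCast, List.map_map]
  refine List.map_congr_left ?_
  intro j hj
  simp only [Function.comp]
  exact hcmu j

theorem consensus_col_builder_spec : Claim_equal_consensus_col_builder := by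
  intro lst refs_num hdom hpre
  unfold Spec_consensus_col_builder consensus_col_builder consensus_col_builder_alt
  dsimp only
  by_cases hge : ((lst.map pvLastSeg).length : Int) ≥ refs_num
  · rw [if_pos hge, if_neg (not_lt.mpr hge)]
    exact congrArg (fun l => some (String.ofList l)) (pvChars_eq (lst.map pvLastSeg))
  · rw [if_neg hge, if_pos (lt_of_not_ge hge)]
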